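-- pv_equiv track=rewrite | github.com/IterUp/advent-of-code | 2024/day10/main.py | part2
-- ===== SOURCE A (Python) =====
-- def sum_neighbours(lines, counts, row, col, i):
--     total = 0
--     w, h = len(lines[0]), len(lines)
--     for offset in ((-1, 0), (1, 0), (0, -1), (0, 1)):
--         r, c = row + offset[0], col + offset[1]
--         if (0 <= r < h) and (0 <= c < w):
--             if lines[r][c] == i - 1:
--                 total += counts[r][c]
--     return total
--
-- def part2(lines):
--     counts = [[1 if c == 0 else 0 for c in line] for line in lines]
--     for i in range(1, 10):
--         for row, line in enumerate(lines):
--             for col, c in enumerate(line):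
--                 if c == i:
--                     counts[row][col] = sum_neighbours(lines, counts, row, col, i)
--     return sum(
--         counts[row][col]
--         for row, line in enumerate(lines)
--         for col, c in enumerate(line)
--         if c == 9
--     )
-- ===== SOURCE B (Python) =====
-- def part2(lines):
--     h = len(lines)
--     w = len(lines[0]) if lines else 0
--
--     def ways(row, col, v):
--         # number of distinct increasing trails from this cell (height v) down to height 0
--         if v == 0:
--             return 1
--         total = 0
--         for dr, dc in ((-1, 0), (1, 0), (0, -1), (0, 1)):
--             r, c = row + dr, col + dc
--             if 0 <= r < h and 0 <= c < w and lines[r][c] == v - 1: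
--                 total += ways(r, c, v - 1)
--         return total
--
--     return sum(
--         ways(row, col, 9)
--         for row, line in enumerate(lines)
--         for col, v in enumerate(line)
--         if v == 9
--     )
-- ===== Notes on version B (the rewrite author's own statement) =====
-- stated objective: faster
-- what changed: Replaces the bottom-up level sweep over a counts matrix (10 full-grid passes building a DP table) by a direct top-down recursion: ways(r,c,v) counts trails from a height-v cell down to a 0-cell by recursing on decreasing height, summed over the 9-cells only, with no counts table at all.
import Mathlib
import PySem

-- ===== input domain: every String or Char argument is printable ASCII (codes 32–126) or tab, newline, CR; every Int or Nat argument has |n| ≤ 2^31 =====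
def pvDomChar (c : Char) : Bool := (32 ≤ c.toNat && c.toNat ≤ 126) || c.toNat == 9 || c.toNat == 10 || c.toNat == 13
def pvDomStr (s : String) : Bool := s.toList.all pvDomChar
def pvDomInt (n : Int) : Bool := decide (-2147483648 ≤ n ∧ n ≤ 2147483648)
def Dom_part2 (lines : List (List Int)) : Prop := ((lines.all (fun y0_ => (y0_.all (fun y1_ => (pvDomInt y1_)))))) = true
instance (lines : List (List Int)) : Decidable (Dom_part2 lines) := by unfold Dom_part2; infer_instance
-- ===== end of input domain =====

-- B replaces A's bottom-up 10-pass DP table by a direct top-down recursion on decreasing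
-- height from the 9-cells (no counts table); same return value on all of Pre_part2.

-- ===== PORT A =====
-- shared cell read: lines[r][c] under the guards 0 ≤ r, 0 ≤ c already checked by both
-- Pythons; in-range (hence exact) on every read either program performs inside Pre_part2
def pvCell (m : List (List Int)) (r c : Int) : Int := (m.getD r.toNat []).getD c.toNat 0

def pvOffsets : List (Int × Int) := [(-1, 0), (1, 0), (0, -1), (0, 1)]

def sumNeighbours (lines counts : List (List Int)) (row col i : Int) : Int :=
  -- w = len(lines[0]): sum_neighbours is only reached when lines has a cell, so headD is exact
  let w : Int := (lines.headD []).length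
  let h : Int := lines.length
  pvOffsets.foldl (fun total p =>
    let r := row + p.1
    let c := col + p.2
    if 0 ≤ r ∧ r < h ∧ 0 ≤ c ∧ c < w then
      if pvCell lines r c = i - 1 then total + pvCell counts r c else total
    else total) 0

def part2 (lines : List (List Int)) : Int :=
  let counts0 := lines.map (fun line => line.map (fun c => if c = 0 then (1 : Int) else 0))
  let counts := (PySem.List.pyRange 1 10 1).foldl (fun counts i =>
    (PySem.List.enumerate lines).foldl (fun counts rl =>
      (PySem.List.enumerate rl.2).foldl (fun counts cv =>
        if cv.2 = i then
          -- counts[row][col] = sum_neighbours(...): row, col come from enumerate, hence ≥ 0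
          counts.set rl.1.toNat ((counts.getD rl.1.toNat []).set cv.1.toNat
            (sumNeighbours lines counts rl.1 cv.1 i))
        else counts) counts) counts) counts0
  (PySem.List.enumerate lines).foldl (fun acc rl =>
    (PySem.List.enumerate rl.2).foldl (fun acc cv =>
      if cv.2 = 9 then acc + pvCell counts rl.1 cv.1 else acc) acc) 0

-- ===== PORT B =====
-- ways(row, col, v) of Source B; h and w are recomputed from the captured `lines` instead of
-- being closure variables (same values on every call)
def ways (lines : List (List Int)) : Nat → Int → Int → Int
  | 0, _, _ => 1
  | v + 1, row, col =>
    let h : Int := lines.length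
    let w : Int := (lines.headD []).length
    pvOffsets.foldl (fun total p =>
      let r := row + p.1
      let c := col + p.2
      if 0 ≤ r ∧ r < h ∧ 0 ≤ c ∧ c < w ∧ pvCell lines r c = (v : Int) then
        total + ways lines v r c
      else total) 0

def part2_alt (lines : List (List Int)) : Int :=
  (PySem.List.enumerate lines).foldl (fun acc rl =>
    (PySem.List.enumerate rl.2).foldl (fun acc cv =>
      if cv.2 = 9 then acc + ways lines 9 rl.1 cv.1 else acc) acc) 0

-- ===== PRECONDITION & SPEC =====
-- Pre_part2 is exactly where the Python A returns: A raises IndexError iff some cell of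
-- height 1..9 has an orthogonal neighbour inside the h × len(lines[0]) box whose column
-- lies beyond that neighbour row's own (shorter) length.
def Pre_part2 (lines : List (List Int)) : Prop :=
  ∀ r ∈ List.range lines.length, ∀ c ∈ List.range (lines.getD r []).length,
    1 ≤ (lines.getD r []).getD c 0 → (lines.getD r []).getD c 0 ≤ 9 →
    ∀ p ∈ pvOffsets,
      0 ≤ (r : Int) + p.1 → (r : Int) + p.1 < (lines.length : Int) →
      0 ≤ (c : Int) + p.2 → (c : Int) + p.2 < (((lines.headD []).length : Nat) : Int) →
      (c : Int) + p.2 < ((lines.getD ((r : Int) + p.1).toNat []).length : Int)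
instance (lines : List (List Int)) : Decidable (Pre_part2 lines) := by unfold Pre_part2; infer_instance

def pvWitness_part2 : List (List Int) := [[0, 1, 2], [9, 8, 3], [6, 7, 4], [5, 4, 5]]

def Spec_part2 (lines : List (List Int)) (out : Int) : Prop := out = part2_alt lines
instance (lines : List (List Int)) (out : Int) : Decidable (Spec_part2 lines out) := by unfold Spec_part2; infer_instance

-- ===== CLAIM (what is proved, stated in full; the proofs are below) =====
def Claim_equal_part2 : Prop := ∀ (lines : List (List Int)), Dom_part2 lines → Pre_part2 lines → Spec_part2 lines (part2 lines)

-- ===== LEMMAS AND PROOFS =====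


-- pointwise cell value at Nat indices (pvCell m r c = gV m r.toNat c.toNat definitionally)
def gV (m : List (List Int)) (r c : Nat) : Int := (m.getD r []).getD c 0

-- the written matrix counts[r][c] = x
def wrt (m : List (List Int)) (r c : Nat) (x : Int) : List (List Int) :=
  m.set r ((m.getD r []).set c x)

-- shape agreement with the input grid
def Shp (lines m : List (List Int)) : Prop :=
  m.length = lines.length ∧ ∀ r : Nat, (m.getD r []).length = (lines.getD r []).length

-- counts agrees with `ways` on every cell of height ≤ i - 1 (the cells sweep i reads)
def HMp (lines m : List (List Int)) (i : Int) : Prop :=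
  ∀ r c : Nat, r < lines.length → c < (lines.getD r []).length →
    0 ≤ gV lines r c → gV lines r c ≤ i - 1 →
    gV m r c = ways lines (gV lines r c).toNat (r : Int) (c : Int)

-- the value of counts[r][c] after sweeps 1..i
def tgt (lines : List (List Int)) (i : Int) (r c : Nat) : Int :=
  if 1 ≤ gV lines r c ∧ gV lines r c ≤ i then ways lines (gV lines r c).toNat (r : Int) (c : Int)
  else if gV lines r c = 0 then 1 else 0

def InvC (lines m : List (List Int)) (i : Int) : Prop :=
  ∀ r c : Nat, r < lines.length → c < (lines.getD r []).length → gV m r c = tgt lines i r c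

lemma getD_set_eq {α : Type} (l : List α) (i : Nat) (a d : α) (h : i < l.length) :
    (l.set i a).getD i d = a := by
  rw [List.getD_eq_getElem?_getD, List.getElem?_set_self h, Option.getD_some]

lemma getD_set_ne {α : Type} (l : List α) (i j : Nat) (a d : α) (h : i ≠ j) :
    (l.set i a).getD j d = l.getD j d := by
  rw [List.getD_eq_getElem?_getD, List.getElem?_set_ne h, ← List.getD_eq_getElem?_getD]

lemma getD_map_row (lines : List (List Int)) (f : List Int → List Int) (r : Nat)
    (hr : r < lines.length) : (lines.map f).getD r [] = f (lines.getD r []) := by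
  rw [List.getD_eq_getElem?_getD, List.getElem?_map, List.getElem?_eq_getElem hr,
      Option.map_some, Option.getD_some, List.getD_eq_getElem lines [] hr]

lemma gV_wrt_self (m : List (List Int)) (r c : Nat) (x : Int)
    (hr : r < m.length) (hc : c < (m.getD r []).length) : gV (wrt m r c x) r c = x := by
  unfold gV wrt
  rw [getD_set_eq _ _ _ _ hr, getD_set_eq _ _ _ _ hc]

lemma gV_wrt_ne (m : List (List Int)) (r c : Nat) (x : Int) (r' c' : Nat)
    (h : ¬(r' = r ∧ c' = c)) : gV (wrt m r c x) r' c' = gV m r' c' := by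
  unfold gV wrt
  by_cases hr : r' = r
  · subst hr
    have hc : c' ≠ c := by tauto
    by_cases hlen : r' < m.length
    · rw [getD_set_eq _ _ _ _ hlen, getD_set_ne _ _ _ _ _ (fun h => hc h.symm)]
    · rw [List.set_eq_of_length_le (by omega)]
  · rw [getD_set_ne _ _ _ _ _ (fun h => hr h.symm)]

lemma shp_wrt (lines m : List (List Int)) (h : Shp lines m) (r c : Nat) (x : Int) :
    Shp lines (wrt m r c x) := by
  obtain ⟨h1, h2⟩ := h
  refine ⟨by simpa [wrt] using h1, fun r' => ?_⟩
  by_cases hr : r' = r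
  · subst hr
    by_cases hlen : r' < m.length
    · rw [wrt, getD_set_eq _ _ _ _ hlen, List.length_set]
      exact h2 r'
    · rw [wrt, List.set_eq_of_length_le (by omega)]
      exact h2 r'
  · rw [wrt, getD_set_ne _ _ _ _ _ (fun h => hr h.symm)]
    exact h2 r'

lemma hmp_of_inv (lines m : List (List Int)) (i : Int) (h : InvC lines m (i - 1)) :
    HMp lines m i := by
  intro r c hr hc h0 hle
  have := h r c hr hc
  rw [this, tgt]
  by_cases hv0 : gV lines r c = 0
  · simp [hv0, ways]
  · rw [if_pos ⟨by omega, by omega⟩]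


lemma sumN_eq_ways (lines : List (List Int)) (hPre : Pre_part2 lines) (i : Int)
    (h1 : 1 ≤ i) (h9 : i ≤ 9) (rr cc : Nat)
    (hr : rr < lines.length) (hc : cc < (lines.getD rr []).length)
    (hv : gV lines rr cc = i) (m : List (List Int)) (hm : HMp lines m i) :
    sumNeighbours lines m (rr : Int) (cc : Int) i = ways lines i.toNat (rr : Int) (cc : Int) := by
  obtain ⟨v, hv⟩ : ∃ v : Nat, i.toNat = v + 1 := ⟨i.toNat - 1, by omega⟩
  have hiv : i = (v : Int) + 1 := by omega
  rw [hv]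
  show (pvOffsets.foldl (fun total p =>
      let r := (rr : Int) + p.1
      let c := (cc : Int) + p.2
      if 0 ≤ r ∧ r < (lines.length : Int) ∧ 0 ≤ c ∧ c < ((lines.headD []).length : Int) then
        if pvCell lines r c = i - 1 then total + pvCell m r c else total
      else total) 0) =
    (pvOffsets.foldl (fun total p =>
      let r := (rr : Int) + p.1
      let c := (cc : Int) + p.2
      if 0 ≤ r ∧ r < (lines.length : Int) ∧ 0 ≤ c ∧ c < ((lines.headD []).length : Int) ∧
          pvCell lines r c = (v : Int) then
        total + ways lines v r c
      else total) 0)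
  apply PySem.List.foldl_congr_mem
  intro total p hp
  simp only
  by_cases hb : 0 ≤ (rr : Int) + p.1 ∧ (rr : Int) + p.1 < (lines.length : Int) ∧
      0 ≤ (cc : Int) + p.2 ∧ (cc : Int) + p.2 < ((lines.headD []).length : Int)
  · by_cases hcell : pvCell lines ((rr : Int) + p.1) ((cc : Int) + p.2) = i - 1
    · rw [if_pos hb, if_pos hcell, if_pos ⟨hb.1, hb.2.1, hb.2.2.1, hb.2.2.2, by omega⟩]
      congr 1
      -- pvCell m r c = ways lines v r c at the read neighbour
      set r : Int := (rr : Int) + p.1 with hrdef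
      set c : Int := (cc : Int) + p.2 with hcdef
      have hlen : c < ((lines.getD r.toNat []).length : Int) :=
        hPre rr (List.mem_range.mpr hr) cc (List.mem_range.mpr hc)
          (by show 1 ≤ gV lines rr cc; omega) (by show gV lines rr cc ≤ 9; omega)
          p hp hb.1 hb.2.1 hb.2.2.1 hb.2.2.2
      have hrn : ((r.toNat : Int)) = r := Int.toNat_of_nonneg hb.1
      have hcn : ((c.toNat : Int)) = c := Int.toNat_of_nonneg hb.2.2.1
      have hgl : gV lines r.toNat c.toNat = (v : Int) := by
        show pvCell lines ((r.toNat : Int)) ((c.toNat : Int)) = (v : Int)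
        rw [hrn, hcn]
        omega
      have := hm r.toNat c.toNat (by omega) (by omega) (by omega) (by omega)
      rw [hgl] at this
      have hcast : ((v : Int)).toNat = v := Int.toNat_natCast v
      rw [hcast] at this
      show gV m r.toNat c.toNat = ways lines v r c
      rw [this, hrn, hcn]
    · rw [if_pos hb, if_neg hcell, if_neg (by
        intro hc5
        exact hcell (by omega))]
  · rw [if_neg hb, if_neg (by intro hc5; exact hb ⟨hc5.1, hc5.2.1, hc5.2.2.1, hc5.2.2.2.1⟩)]


lemma colFold (lines : List (List Int)) (hPre : Pre_part2 lines) (i : Int)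
    (h1 : 1 ≤ i) (h9 : i ≤ 9) (rr : Nat) (hrr : rr < lines.length) :
    ∀ (k t : Nat) (m : List (List Int)), (lines.getD rr []).length - t = k →
      Shp lines m → HMp lines m i →
      (Shp lines ((PySem.List.enumerate ((lines.getD rr []).drop t) (t : Int)).foldl
          (fun counts cv => if cv.2 = i then
              counts.set rr ((counts.getD rr []).set cv.1.toNat
                (sumNeighbours lines counts (rr : Int) cv.1 i))
            else counts) m)) ∧
      HMp lines ((PySem.List.enumerate ((lines.getD rr []).drop t) (t : Int)).foldl
          (fun counts cv => if cv.2 = i then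
              counts.set rr ((counts.getD rr []).set cv.1.toNat
                (sumNeighbours lines counts (rr : Int) cv.1 i))
            else counts) m) i ∧
      (∀ r' c' : Nat, r' < lines.length → c' < (lines.getD r' []).length →
        gV ((PySem.List.enumerate ((lines.getD rr []).drop t) (t : Int)).foldl
          (fun counts cv => if cv.2 = i then
              counts.set rr ((counts.getD rr []).set cv.1.toNat
                (sumNeighbours lines counts (rr : Int) cv.1 i))
            else counts) m) r' c' =
          if r' = rr ∧ t ≤ c' ∧ gV lines r' c' = i then ways lines i.toNat (r' : Int) (c' : Int)
          else gV m r' c') := by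
  intro k
  induction k with
  | zero =>
    intro t m hk hshp hhm
    have hdrop : (lines.getD rr []).drop t = [] := List.drop_of_length_le (by omega)
    rw [hdrop, PySem.List.enumerate_nil, List.foldl_nil]
    refine ⟨hshp, hhm, fun r' c' hr' hc' => ?_⟩
    rw [if_neg]
    rintro ⟨he, hle, -⟩
    subst he
    omega
  | succ k ih =>
    intro t m hk hshp hhm
    have ht : t < (lines.getD rr []).length := by omega
    have hdrop : (lines.getD rr []).drop t =
        (lines.getD rr [])[t] :: (lines.getD rr []).drop (t + 1) := List.drop_eq_getElem_cons ht
    have hcast : (t : Int) + 1 = ((t + 1 : Nat) : Int) := by push_cast; ring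
    rw [hdrop, PySem.List.enumerate_cons, hcast, List.foldl_cons]
    simp only [Int.toNat_natCast]
    have hgt : gV lines rr t = (lines.getD rr [])[t] := List.getD_eq_getElem _ 0 ht
    by_cases hx : (lines.getD rr [])[t] = i
    · rw [if_pos hx]
      have hsum : sumNeighbours lines m (rr : Int) (t : Int) i =
          ways lines i.toNat (rr : Int) (t : Int) :=
        sumN_eq_ways lines hPre i h1 h9 rr t hrr ht (by omega) m hhm
      rw [hsum]
      have hwrt : (m.set rr ((m.getD rr []).set t (ways lines i.toNat (rr : Int) (t : Int)))) =
          wrt m rr t (ways lines i.toNat (rr : Int) (t : Int)) := rfl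
      rw [hwrt]
      have hshp1 := shp_wrt lines m hshp rr t (ways lines i.toNat (rr : Int) (t : Int))
      have hhm1 : HMp lines (wrt m rr t (ways lines i.toNat (rr : Int) (t : Int))) i := by
        intro r c hr hc h0 hle
        by_cases hrc : r = rr ∧ c = t
        · exfalso
          obtain ⟨h1', h2'⟩ := hrc
          subst h1'; subst h2'
          omega
        · rw [gV_wrt_ne _ _ _ _ _ _ hrc]
          exact hhm r c hr hc h0 hle
      obtain ⟨S, H, PW⟩ := ih (t + 1) _ (by omega) hshp1 hhm1
      refine ⟨S, H, fun r' c' hr' hc' => ?_⟩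
      rw [PW r' c' hr' hc']
      by_cases hcond : r' = rr ∧ t + 1 ≤ c' ∧ gV lines r' c' = i
      · rw [if_pos hcond, if_pos ⟨hcond.1, by omega, hcond.2.2⟩]
      · rw [if_neg hcond]
        by_cases hcond2 : r' = rr ∧ t ≤ c' ∧ gV lines r' c' = i
        · have hct : c' = t := by
            rcases hcond2 with ⟨he, hle2, hv2⟩
            by_contra hne
            exact hcond ⟨he, by omega, hv2⟩
          obtain ⟨he, -, -⟩ := hcond2
          subst he; subst hct
          rw [if_pos ⟨rfl, le_refl _, by omega⟩]
          exact gV_wrt_self m r' c' _ (by have := hshp.1; omega) (by have := hshp.2 r'; omega)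
        · rw [if_neg hcond2]
          apply gV_wrt_ne
          rintro ⟨he, hce⟩
          subst he; subst hce
          exact hcond2 ⟨rfl, le_refl _, by omega⟩
    · rw [if_neg hx]
      obtain ⟨S, H, PW⟩ := ih (t + 1) m (by omega) hshp hhm
      refine ⟨S, H, fun r' c' hr' hc' => ?_⟩
      rw [PW r' c' hr' hc']
      by_cases hcond : r' = rr ∧ t + 1 ≤ c' ∧ gV lines r' c' = i
      · rw [if_pos hcond, if_pos ⟨hcond.1, by omega, hcond.2.2⟩]
      · rw [if_neg hcond, if_neg]
        rintro ⟨he, hle2, hv2⟩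
        subst he
        have hne : c' ≠ t := by
          intro hce
          subst hce
          omega
        exact hcond ⟨rfl, by omega, hv2⟩

lemma rowFold (lines : List (List Int)) (hPre : Pre_part2 lines) (i : Int)
    (h1 : 1 ≤ i) (h9 : i ≤ 9) :
    ∀ (k s : Nat) (m : List (List Int)), lines.length - s = k →
      Shp lines m → HMp lines m i →
      (Shp lines ((PySem.List.enumerate (lines.drop s) (s : Int)).foldl
          (fun counts rl => (PySem.List.enumerate rl.2).foldl
            (fun counts cv => if cv.2 = i then
                counts.set rl.1.toNat ((counts.getD rl.1.toNat []).set cv.1.toNat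
                  (sumNeighbours lines counts rl.1 cv.1 i))
              else counts) counts) m)) ∧
      HMp lines ((PySem.List.enumerate (lines.drop s) (s : Int)).foldl
          (fun counts rl => (PySem.List.enumerate rl.2).foldl
            (fun counts cv => if cv.2 = i then
                counts.set rl.1.toNat ((counts.getD rl.1.toNat []).set cv.1.toNat
                  (sumNeighbours lines counts rl.1 cv.1 i))
              else counts) counts) m) i ∧
      (∀ r' c' : Nat, r' < lines.length → c' < (lines.getD r' []).length →
        gV ((PySem.List.enumerate (lines.drop s) (s : Int)).foldl
          (fun counts rl => (PySem.List.enumerate rl.2).foldl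
            (fun counts cv => if cv.2 = i then
                counts.set rl.1.toNat ((counts.getD rl.1.toNat []).set cv.1.toNat
                  (sumNeighbours lines counts rl.1 cv.1 i))
              else counts) counts) m) r' c' =
          if (s : Nat) ≤ r' ∧ gV lines r' c' = i then ways lines i.toNat (r' : Int) (c' : Int)
          else gV m r' c') := by
  intro k
  induction k with
  | zero =>
    intro s m hk hshp hhm
    have hdrop : lines.drop s = [] := List.drop_of_length_le (by omega)
    rw [hdrop, PySem.List.enumerate_nil, List.foldl_nil]
    refine ⟨hshp, hhm, fun r' c' hr' hc' => ?_⟩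
    rw [if_neg]
    rintro ⟨hle, -⟩
    omega
  | succ k ih =>
    intro s m hk hshp hhm
    have hs : s < lines.length := by omega
    have hdrop : lines.drop s = lines[s] :: lines.drop (s + 1) := List.drop_eq_getElem_cons hs
    have hcast : (s : Int) + 1 = ((s + 1 : Nat) : Int) := by push_cast; ring
    rw [hdrop, PySem.List.enumerate_cons, hcast, List.foldl_cons]
    simp only [Int.toNat_natCast]
    have hgetd : lines.getD s [] = lines[s] := List.getD_eq_getElem lines [] hs
    have CF := colFold lines hPre i h1 h9 s hs (lines.getD s []).length 0 m (by omega) hshp hhm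
    simp only [List.drop_zero, Nat.cast_zero, hgetd] at CF
    obtain ⟨S1, H1, PW1⟩ := CF
    obtain ⟨S, H, PW⟩ := ih (s + 1) _ (by omega) S1 H1
    refine ⟨S, H, fun r' c' hr' hc' => ?_⟩
    rw [PW r' c' hr' hc']
    by_cases hcond : s + 1 ≤ r' ∧ gV lines r' c' = i
    · rw [if_pos hcond, if_pos ⟨by omega, hcond.2⟩]
    · rw [if_neg hcond, PW1 r' c' hr' hc']
      by_cases hcond2 : r' = s ∧ 0 ≤ c' ∧ gV lines r' c' = i
      · rw [if_pos hcond2, if_pos ⟨by omega, hcond2.2.2⟩]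
      · rw [if_neg hcond2, if_neg]
        rintro ⟨hle, hv2⟩
        have : r' = s := by omega
        exact hcond2 ⟨this, by omega, hv2⟩


lemma sweep_inv (lines : List (List Int)) (hPre : Pre_part2 lines) (i : Int)
    (h1 : 1 ≤ i) (h9 : i ≤ 9) (m : List (List Int))
    (hs : Shp lines m) (j : Int) (hj : j = i - 1) (hi : InvC lines m j) :
    Shp lines ((PySem.List.enumerate lines).foldl
        (fun counts rl => (PySem.List.enumerate rl.2).foldl
          (fun counts cv => if cv.2 = i then
              counts.set rl.1.toNat ((counts.getD rl.1.toNat []).set cv.1.toNat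
                (sumNeighbours lines counts rl.1 cv.1 i))
            else counts) counts) m) ∧
    InvC lines ((PySem.List.enumerate lines).foldl
        (fun counts rl => (PySem.List.enumerate rl.2).foldl
          (fun counts cv => if cv.2 = i then
              counts.set rl.1.toNat ((counts.getD rl.1.toNat []).set cv.1.toNat
                (sumNeighbours lines counts rl.1 cv.1 i))
            else counts) counts) m) i := by
  subst hj
  have hhm := hmp_of_inv lines m i hi
  have RF := rowFold lines hPre i h1 h9 lines.length 0 m (by omega) hs hhm
  simp only [List.drop_zero, Nat.cast_zero] at RF
  obtain ⟨S, H, PW⟩ := RF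
  refine ⟨S, fun r c hr hc => ?_⟩
  rw [PW r c hr hc, hi r c hr hc]
  by_cases hv : gV lines r c = i
  · rw [if_pos ⟨Nat.zero_le r, hv⟩]
    unfold tgt
    rw [hv, if_pos ⟨h1, le_refl i⟩]
  · rw [if_neg (by rintro ⟨-, h⟩; exact hv h)]
    unfold tgt
    split_ifs <;> first | rfl | omega


lemma counts0_shp (lines : List (List Int)) :
    Shp lines (lines.map (fun line => line.map (fun c => if c = 0 then (1 : Int) else 0))) := by
  refine ⟨by simp, fun r => ?_⟩
  by_cases hr : r < lines.length
  · rw [getD_map_row _ _ _ hr, List.length_map]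
  · rw [List.getD_eq_default _ _ (by simpa using (by omega : lines.length ≤ r)),
        List.getD_eq_default _ _ (by omega)]

lemma counts0_inv (lines : List (List Int)) :
    InvC lines (lines.map (fun line => line.map (fun c => if c = 0 then (1 : Int) else 0))) 0 := by
  intro r c hr hc
  unfold gV tgt
  rw [getD_map_row _ _ _ hr]
  have hg : (lines.getD r []).getD c 0 = gV lines r c := rfl
  rw [List.getD_eq_getElem?_getD, List.getElem?_map, List.getElem?_eq_getElem hc,
      Option.map_some, Option.getD_some]
  have hg2 : (lines.getD r [])[c] = gV lines r c := by
    rw [← List.getD_eq_getElem _ 0 hc]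
    rfl
  rw [hg2]
  split_ifs with h1 h2 <;> omega

lemma levels (lines : List (List Int)) (hPre : Pre_part2 lines) :
    ∀ k : Nat, k ≤ 9 →
      Shp lines ((PySem.List.pyRange 1 ((k : Int) + 1) 1).foldl
        (fun counts i => (PySem.List.enumerate lines).foldl
          (fun counts rl => (PySem.List.enumerate rl.2).foldl
            (fun counts cv => if cv.2 = i then
                counts.set rl.1.toNat ((counts.getD rl.1.toNat []).set cv.1.toNat
                  (sumNeighbours lines counts rl.1 cv.1 i))
              else counts) counts) counts)
        (lines.map (fun line => line.map (fun c => if c = 0 then (1 : Int) else 0)))) ∧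
      InvC lines ((PySem.List.pyRange 1 ((k : Int) + 1) 1).foldl
        (fun counts i => (PySem.List.enumerate lines).foldl
          (fun counts rl => (PySem.List.enumerate rl.2).foldl
            (fun counts cv => if cv.2 = i then
                counts.set rl.1.toNat ((counts.getD rl.1.toNat []).set cv.1.toNat
                  (sumNeighbours lines counts rl.1 cv.1 i))
              else counts) counts) counts)
        (lines.map (fun line => line.map (fun c => if c = 0 then (1 : Int) else 0)))) (k : Int) := by
  intro k
  induction k with
  | zero =>
    intro hk
    have : ((0 : Nat) : Int) + 1 = 1 := by norm_num
    rw [this, PySem.List.pyRange_one_eq_nil (le_refl 1), List.foldl_nil]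
    exact ⟨counts0_shp lines, by simpa using counts0_inv lines⟩
  | succ k ih =>
    intro hk
    obtain ⟨S0, I0⟩ := ih (by omega)
    have hsplit : PySem.List.pyRange 1 (((k + 1 : Nat) : Int) + 1) 1 =
        PySem.List.pyRange 1 ((k : Int) + 1) 1 ++ [(k : Int) + 1] := by
      have : ((k + 1 : Nat) : Int) + 1 = ((k : Int) + 1) + 1 := by push_cast; ring
      rw [this, PySem.List.pyRange_one_succ_right (by omega)]
    rw [hsplit, List.foldl_append, List.foldl_cons, List.foldl_nil]
    have := sweep_inv lines hPre ((k : Int) + 1) (by omega) (by push_cast at hk ⊢; omega)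
      _ S0 (k : Int) (by ring) I0
    refine ⟨this.1, ?_⟩
    have h2 := this.2
    rw [show (((k + 1 : Nat) : Int)) = (k : Int) + 1 by push_cast; ring]
    exact h2


lemma sumCols (lines M : List (List Int))
    (h9 : ∀ r c : Nat, r < lines.length → c < (lines.getD r []).length →
      gV lines r c = 9 → gV M r c = ways lines 9 (r : Int) (c : Int))
    (rr : Nat) (hrr : rr < lines.length) :
    ∀ (k t : Nat) (acc : Int), (lines.getD rr []).length - t = k →
      (PySem.List.enumerate ((lines.getD rr []).drop t) (t : Int)).foldl
        (fun acc cv => if cv.2 = 9 then acc + pvCell M (rr : Int) cv.1 else acc) acc =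
      (PySem.List.enumerate ((lines.getD rr []).drop t) (t : Int)).foldl
        (fun acc cv => if cv.2 = 9 then acc + ways lines 9 (rr : Int) cv.1 else acc) acc := by
  intro k
  induction k with
  | zero =>
    intro t acc hk
    have hdrop : (lines.getD rr []).drop t = [] := List.drop_of_length_le (by omega)
    rw [hdrop, PySem.List.enumerate_nil, List.foldl_nil, List.foldl_nil]
  | succ k ih =>
    intro t acc hk
    have ht : t < (lines.getD rr []).length := by omega
    have hdrop : (lines.getD rr []).drop t =
        (lines.getD rr [])[t] :: (lines.getD rr []).drop (t + 1) := List.drop_eq_getElem_cons ht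
    have hcast : (t : Int) + 1 = ((t + 1 : Nat) : Int) := by push_cast; ring
    rw [hdrop, PySem.List.enumerate_cons, hcast, List.foldl_cons, List.foldl_cons]
    simp only
    by_cases hx : (lines.getD rr [])[t] = 9
    · rw [if_pos hx, if_pos hx]
      have hgt : gV lines rr t = (lines.getD rr [])[t] := List.getD_eq_getElem _ 0 ht
      have hcell : pvCell M (rr : Int) (t : Int) = gV M rr t := by
        unfold pvCell gV
        rw [Int.toNat_natCast, Int.toNat_natCast]
      rw [hcell, h9 rr t hrr ht (by omega)]
      exact ih (t + 1) _ (by omega)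
    · rw [if_neg hx, if_neg hx]
      exact ih (t + 1) _ (by omega)


lemma sumRows (lines M : List (List Int))
    (h9 : ∀ r c : Nat, r < lines.length → c < (lines.getD r []).length →
      gV lines r c = 9 → gV M r c = ways lines 9 (r : Int) (c : Int)) :
    ∀ (k s : Nat) (acc : Int), lines.length - s = k →
      (PySem.List.enumerate (lines.drop s) (s : Int)).foldl
        (fun acc rl => (PySem.List.enumerate rl.2).foldl
          (fun acc cv => if cv.2 = 9 then acc + pvCell M rl.1 cv.1 else acc) acc) acc =
      (PySem.List.enumerate (lines.drop s) (s : Int)).foldl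
        (fun acc rl => (PySem.List.enumerate rl.2).foldl
          (fun acc cv => if cv.2 = 9 then acc + ways lines 9 rl.1 cv.1 else acc) acc) acc := by
  intro k
  induction k with
  | zero =>
    intro s acc hk
    have hdrop : lines.drop s = [] := List.drop_of_length_le (by omega)
    rw [hdrop, PySem.List.enumerate_nil, List.foldl_nil, List.foldl_nil]
  | succ k ih =>
    intro s acc hk
    have hs : s < lines.length := by omega
    have hdrop : lines.drop s = lines[s] :: lines.drop (s + 1) := List.drop_eq_getElem_cons hs
    have hcast : (s : Int) + 1 = ((s + 1 : Nat) : Int) := by push_cast; ring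
    rw [hdrop, PySem.List.enumerate_cons, hcast, List.foldl_cons, List.foldl_cons]
    simp only
    have hgetd : lines.getD s [] = lines[s] := List.getD_eq_getElem lines [] hs
    have SC := sumCols lines M h9 s hs (lines.getD s []).length 0 acc (by omega)
    simp only [List.drop_zero, Nat.cast_zero, hgetd] at SC
    rw [SC]
    exact ih (s + 1) _ (by omega)


-- ===== VERDICT (by name: the statement is the Claim_ definition above) =====
theorem part2_spec : Claim_equal_part2 := by
  intro lines hDom hPre
  unfold Spec_part2 part2 part2_alt
  simp only
  have L := levels lines hPre 9 (le_refl 9)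
  rw [show (10 : Int) = ((9 : Nat) : Int) + 1 by norm_num]
  obtain ⟨-, I9⟩ := L
  have h9cells : ∀ r c : Nat, r < lines.length → c < (lines.getD r []).length →
      gV lines r c = 9 → gV ((PySem.List.pyRange 1 (((9 : Nat) : Int) + 1) 1).foldl
        (fun counts i => (PySem.List.enumerate lines).foldl
          (fun counts rl => (PySem.List.enumerate rl.2).foldl
            (fun counts cv => if cv.2 = i then
                counts.set rl.1.toNat ((counts.getD rl.1.toNat []).set cv.1.toNat
                  (sumNeighbours lines counts rl.1 cv.1 i))
              else counts) counts) counts)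
        (lines.map (fun line => line.map (fun c => if c = 0 then (1 : Int) else 0)))) r c =
        ways lines 9 (r : Int) (c : Int) := by
    intro r c hr hc hv
    have := I9 r c hr hc
    rw [this, tgt, hv]
    rw [if_pos (by norm_num)]
    rfl
  have SR := sumRows lines _ h9cells lines.length 0 0 (by omega)
  simp only [List.drop_zero, Nat.cast_zero] at SR
  exact SR
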